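-- pv_equiv track=rewrite | github.com/lsmman/All-about-Algorithms | python-programmers/77485.py | solution
-- ===== SOURCE A (Python) =====
-- def solution(rows, columns, queries):
--     answer = []
--     # 문제 조건대로 MAP 생성
--     # 예) rows, columns = 2, 3인 경우
--     # [ [1, 2, 3]
--     #   [4, 5, 6] ]
--     MAP = [[r * columns + c + 1 for c in range(columns)] for r in range(rows)]
--     min_init_val = rows * columns + 1  # MAP의 가장 큰 값 + 1
--
--     for loc in queries:
--         y1, x1, y2, x2 = list(map(lambda x: x - 1, loc))  # queries는 1부터 시작하기 때문에 -1
--         preq = temp = MAP[y1][x1]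
--         min_val = min_init_val
--
--         # x1, y1으로부터 x를 더해가며 visit = 오른쪽으로 이동하며 visit
--         y = y1
--         for x in range(x1, x2):
--             temp = MAP[y][x]  # 현재 좌표의 값은 저장
--             MAP[y][x] = preq  # 전 칸의 값은 현재 좌표의 값에 assign
--             preq = temp
--             min_val = min(temp, min_val)  # visit한 숫자 중 가장 작은 숫자
--
--         # x2, y1으로부터 y를 더해가며 visit = 아래쪽으로 이동하며 visit
--         x = x2
--         for y in range(y1, y2):
--             temp = MAP[y][x]  # 현재 좌표의 값은 저장
--             MAP[y][x] = preq  # 전 칸의 값은 현재 좌표의 값에 assign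
--             preq = temp
--             min_val = min(temp, min_val)
--
--         # x2, y2으로부터 x를 빼가며 visit = 왼쪽으로 이동하며 visit
--         y = y2
--         for x in range(x2, x1, -1):
--             temp = MAP[y][x]  # 현재 좌표의 값은 저장
--             MAP[y][x] = preq  # 전 칸의 값은 현재 좌표의 값에 assign
--             preq = temp
--             min_val = min(temp, min_val)
--
--         # x1, y2으로부터 y를 빼가며 visit = 위쪽으로 이동하며 visit
--         x = x1
--         for y in range(y2, y1 - 1, -1):
--             temp = MAP[y][x]  # 현재 좌표의 값은 저장
--             MAP[y][x] = preq  # 전 칸의 값은 현재 좌표의 값에 assign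
--             preq = temp
--             min_val = min(temp, min_val)  # visit한 숫자 중 가장 작은 숫자
--
--         answer.append(min_val)
--     return answer
-- ===== SOURCE B (Python) =====
-- def solution(rows, columns, queries):
--     # gather / compute-min / scatter decomposition over an explicit border buffer
--     grid = [[r * columns + c + 1 for c in range(columns)] for r in range(rows)]
--     answer = []
--     for y1, x1, y2, x2 in queries:
--         y1 -= 1; x1 -= 1; y2 -= 1; x2 -= 1
--         coords = ([(y1, x) for x in range(x1, x2)]
--                   + [(y, x2) for y in range(y1, y2)]
--                   + [(y2, x) for x in range(x2, x1, -1)]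
--                   + [(y, x1) for y in range(y2, y1, -1)])
--         values = [grid[y][x] for y, x in coords]
--         answer.append(min(values))
--         rotated = [values[-1]] + values[:-1]
--         for (y, x), v in zip(coords, rotated):
--             grid[y][x] = v
--     return answer
-- ===== Notes on version B (the rewrite author's own statement) =====
-- stated objective: simpler
-- what changed: Replaces A's interleaved sliding pass (four loops threading preq/temp and min through read-then-overwrite steps) with a gather / compute-min / scatter decomposition: collect the border coordinates, gather their values into a buffer, answer min(buffer), write the buffer back rotated by one.
-- outside the precondition, e.g. on solution(6, 2, [[1, 1, 6, 1], [3, 1, 6, 1]]): A returns [1, 5], B returns [1, 7]; on solution(3, 3, [[2, 2, 2, 2]]): A returns [5], B raises ValueError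
import Mathlib
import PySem

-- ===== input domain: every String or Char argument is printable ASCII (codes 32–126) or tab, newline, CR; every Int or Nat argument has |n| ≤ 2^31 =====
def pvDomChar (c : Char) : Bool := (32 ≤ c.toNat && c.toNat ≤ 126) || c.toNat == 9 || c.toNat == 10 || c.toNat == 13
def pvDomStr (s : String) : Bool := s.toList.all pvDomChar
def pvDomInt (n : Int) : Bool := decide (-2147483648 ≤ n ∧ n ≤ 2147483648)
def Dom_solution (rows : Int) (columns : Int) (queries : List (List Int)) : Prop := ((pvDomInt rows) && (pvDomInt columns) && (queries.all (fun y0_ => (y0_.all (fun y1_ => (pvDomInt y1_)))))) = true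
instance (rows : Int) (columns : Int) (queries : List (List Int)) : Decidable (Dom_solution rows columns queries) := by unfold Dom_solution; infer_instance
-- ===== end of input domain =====

-- B replaces A's interleaved sliding border pass with a gather / min / scatter-rotated decomposition (objective: simpler).

-- Shared subscript helpers: MAP[y][x] read and write (total forms; exact on in-range indices, which Pre_ guarantees).
def pvGet2 (m : List (List Int)) (y x : Int) : Int :=
  PySem.List.pyGetD (PySem.List.pyGetD m y []) x 0

def pvSet2 (m : List (List Int)) (y x : Int) (v : Int) : List (List Int) :=
  PySem.List.pySetD m y (PySem.List.pySetD (PySem.List.pyGetD m y []) x v)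

-- ===== PORT A =====
-- one iteration of A's sliding loops: temp = MAP[y][x]; MAP[y][x] = preq; preq = temp; min_val = min(temp, min_val)
def pvStepA (s : List (List Int) × Int × Int) (c : Int × Int) : List (List Int) × Int × Int :=
  let temp := pvGet2 s.1 c.1 c.2
  (pvSet2 s.1 c.1 c.2 s.2.1, temp, min temp s.2.2)

-- the body of A's `for loc in queries` loop (state: MAP, answer)
def pvQStepA (rows columns : Int) (st : List (List Int) × List Int) (loc : List Int) :
    List (List Int) × List Int :=
  let l := loc.map (fun x => x - 1)
  let y1 := PySem.List.pyGetD l 0 0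
  let x1 := PySem.List.pyGetD l 1 0
  let y2 := PySem.List.pyGetD l 2 0
  let x2 := PySem.List.pyGetD l 3 0
  let s0 : List (List Int) × Int × Int := (st.1, pvGet2 st.1 y1 x1, rows * columns + 1)
  let s1 := (PySem.List.pyRange x1 x2 1).foldl (fun s x => pvStepA s (y1, x)) s0
  let s2 := (PySem.List.pyRange y1 y2 1).foldl (fun s y => pvStepA s (y, x2)) s1
  let s3 := (PySem.List.pyRange x2 x1 (-1)).foldl (fun s x => pvStepA s (y2, x)) s2
  let s4 := (PySem.List.pyRange y2 (y1 - 1) (-1)).foldl (fun s y => pvStepA s (y, x1)) s3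
  (s4.1, st.2 ++ [s4.2.2])

def solution (rows : Int) (columns : Int) (queries : List (List Int)) : List Int :=
  let MAP := (PySem.List.pyRange 0 rows 1).map
    (fun r => (PySem.List.pyRange 0 columns 1).map (fun c => r * columns + c + 1))
  (queries.foldl (pvQStepA rows columns) (MAP, [])).2

-- ===== PORT B =====
-- the body of B's `for y1, x1, y2, x2 in queries` loop (state: grid, answer)
def pvQStepB (st : List (List Int) × List Int) (loc : List Int) :
    List (List Int) × List Int :=
  let y1 := PySem.List.pyGetD loc 0 0 - 1
  let x1 := PySem.List.pyGetD loc 1 0 - 1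
  let y2 := PySem.List.pyGetD loc 2 0 - 1
  let x2 := PySem.List.pyGetD loc 3 0 - 1
  let coords : List (Int × Int) :=
    (PySem.List.pyRange x1 x2 1).map (fun x => (y1, x))
    ++ (PySem.List.pyRange y1 y2 1).map (fun y => (y, x2))
    ++ (PySem.List.pyRange x2 x1 (-1)).map (fun x => (y2, x))
    ++ (PySem.List.pyRange y2 y1 (-1)).map (fun y => (y, x1))
  let values := coords.map (fun p => pvGet2 st.1 p.1 p.2)
  let ans := (PySem.List.min? values (fun v => v)).getD 0
  let rotated := PySem.List.pyGetD values (-1) 0 :: PySem.List.slice values none (some (-1))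
  let grid := (coords.zip rotated).foldl (fun g pv => pvSet2 g pv.1.1 pv.1.2 pv.2) st.1
  (grid, st.2 ++ [ans])

def solution_alt (rows : Int) (columns : Int) (queries : List (List Int)) : List Int :=
  let grid := (PySem.List.pyRange 0 rows 1).map
    (fun r => (PySem.List.pyRange 0 columns 1).map (fun c => r * columns + c + 1))
  (queries.foldl pvQStepB (grid, [])).2

-- ===== PRECONDITION & SPEC =====
def pvQueryOK (rows columns : Int) (q : List Int) : Bool :=
  match q with
  | [y1, x1, y2, x2] =>
      decide (1 ≤ y1 ∧ y1 < y2 ∧ y2 ≤ rows ∧ 1 ≤ x1 ∧ x1 < x2 ∧ x2 ≤ columns)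
  | _ => false

-- Pre_ excludes malformed queries (wrong arity or out-of-bounds coordinates, where A raises) and
-- degenerate 1-wide / 1-tall query rectangles, which the problem's constraints (x1<x2, y1<y2) forbid
-- and on which "rotate the border" is unspecified, so A's and B's values legitimately differ there.
def Pre_solution (rows : Int) (columns : Int) (queries : List (List Int)) : Prop :=
  ∀ q ∈ queries, pvQueryOK rows columns q = true

instance (rows : Int) (columns : Int) (queries : List (List Int)) : Decidable (Pre_solution rows columns queries) := by
  unfold Pre_solution; infer_instance

def pvWitness_solution : Int × Int × List (List Int) := (3, 3, [[1, 1, 2, 3], [2, 1, 3, 2]])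

def Spec_solution (rows : Int) (columns : Int) (queries : List (List Int)) (out : List Int) : Prop := out = solution_alt rows columns queries
instance (rows : Int) (columns : Int) (queries : List (List Int)) (out : List Int) : Decidable (Spec_solution rows columns queries out) := by unfold Spec_solution; infer_instance

-- ===== CLAIM (what is proved, stated in full; the proofs are below) =====
def Claim_equal_solution : Prop := ∀ (rows : Int) (columns : Int) (queries : List (List Int)), Dom_solution rows columns queries → Pre_solution rows columns queries → Spec_solution rows columns queries (solution rows columns queries)

-- ===== LEMMAS AND PROOFS =====

def pvShape (m : List (List Int)) (r c : Nat) : Prop :=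
  m.length = r ∧ ∀ row ∈ m, row.length = c
def pvOk (r c : Nat) (p : Int × Int) : Prop :=
  0 ≤ p.1 ∧ p.1 < (r : Int) ∧ 0 ≤ p.2 ∧ p.2 < (c : Int)

-- nat-index normal forms
lemma pvGet2_nat (m : List (List Int)) (a b : Nat) :
    pvGet2 m (a : Int) (b : Int) = (m.getD a []).getD b 0 := by
  simp [pvGet2]

lemma pvSet2_nat (m : List (List Int)) (a b : Nat) (v : Int) :
    pvSet2 m (a : Int) (b : Int) v = m.set a ((m.getD a []).set b v) := by
  simp [pvSet2]

lemma pvGetDrow_mem {m : List (List Int)} (a : Nat) (h : a < m.length) : m.getD a [] ∈ m := by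
  rw [List.getD_eq_getElem m [] h]; exact List.getElem_mem h

lemma pvShape_set2 {m : List (List Int)} {r c : Nat} (h : pvShape m r c) {p : Int × Int}
    (hp : pvOk r c p) (v : Int) : pvShape (pvSet2 m p.1 p.2 v) r c := by
  obtain ⟨hlen, hrow⟩ := h
  obtain ⟨h1, h2, h3, h4⟩ := hp
  rw [← Int.toNat_of_nonneg h1, ← Int.toNat_of_nonneg h3, pvSet2_nat]
  refine ⟨by simpa using hlen, ?_⟩
  intro row hmem
  rcases List.mem_or_eq_of_mem_set hmem with hr | hr
  · exact hrow row hr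
  · subst hr
    rw [List.length_set]
    apply hrow
    exact pvGetDrow_mem _ (by omega)


lemma pvGet2_set2_self {m : List (List Int)} {r c : Nat} (h : pvShape m r c) {p : Int × Int}
    (hp : pvOk r c p) (v : Int) : pvGet2 (pvSet2 m p.1 p.2 v) p.1 p.2 = v := by
  obtain ⟨hlen, hrow⟩ := h
  obtain ⟨h1, h2, h3, h4⟩ := hp
  rw [← Int.toNat_of_nonneg h1, ← Int.toNat_of_nonneg h3, pvSet2_nat, pvGet2_nat]
  have ha : p.1.toNat < m.length := by omega
  have hr : (m.getD p.1.toNat []).length = c := hrow _ (pvGetDrow_mem _ ha)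
  have hb : p.2.toNat < (m.getD p.1.toNat []).length := by omega
  have hb' : p.2.toNat < m[p.1.toNat].length := by
    rw [← List.getD_eq_getElem m [] ha]; omega
  simp [List.getD_eq_getElem?_getD, ha, hb']

lemma pvGet2_set2_ne {m : List (List Int)} {r c : Nat} (h : pvShape m r c) {p q : Int × Int}
    (hp : pvOk r c p) (hq : pvOk r c q) (hne : p ≠ q) (v : Int) :
    pvGet2 (pvSet2 m p.1 p.2 v) q.1 q.2 = pvGet2 m q.1 q.2 := by
  obtain ⟨hlen, hrow⟩ := h
  obtain ⟨h1, h2, h3, h4⟩ := hp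
  obtain ⟨g1, g2, g3, g4⟩ := hq
  rw [← Int.toNat_of_nonneg h1, ← Int.toNat_of_nonneg h3,
      ← Int.toNat_of_nonneg g1, ← Int.toNat_of_nonneg g3, pvSet2_nat, pvGet2_nat, pvGet2_nat]
  by_cases hy : p.1.toNat = q.1.toNat
  · have hx : p.2.toNat ≠ q.2.toNat := by
      intro hx; apply hne; ext
      · omega
      · omega
    have ha : p.1.toNat < m.length := by omega
    rw [← hy]
    have : ((m.set p.1.toNat ((m.getD p.1.toNat []).set p.2.toNat v)).getD p.1.toNat [])
        = (m.getD p.1.toNat []).set p.2.toNat v := by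
      simp [List.getD_eq_getElem?_getD, ha]
    rw [this]
    simp [List.getD_eq_getElem?_getD, List.getElem?_set_ne, hx]
  · have : ((m.set p.1.toNat ((m.getD p.1.toNat []).set p.2.toNat v)).getD q.1.toNat [])
        = m.getD q.1.toNat [] := by
      simp [List.getD_eq_getElem?_getD, List.getElem?_set_ne, hy]
    rw [this]

lemma pvSet2_set2_self {m : List (List Int)} {r c : Nat} (h : pvShape m r c) {p : Int × Int}
    (hp : pvOk r c p) (v w : Int) :
    pvSet2 (pvSet2 m p.1 p.2 v) p.1 p.2 w = pvSet2 m p.1 p.2 w := by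
  obtain ⟨hlen, hrow⟩ := h
  obtain ⟨h1, h2, h3, h4⟩ := hp
  rw [← Int.toNat_of_nonneg h1, ← Int.toNat_of_nonneg h3, pvSet2_nat, pvSet2_nat, pvSet2_nat]
  have ha : p.1.toNat < m.length := by omega
  have hrowset : ((m.set p.1.toNat ((m.getD p.1.toNat []).set p.2.toNat v)).getD p.1.toNat [])
      = (m.getD p.1.toNat []).set p.2.toNat v := by
    simp [List.getD_eq_getElem?_getD, ha]
  rw [hrowset, List.set_set, List.set_set]

lemma pvSet2_comm {m : List (List Int)} {r c : Nat} (h : pvShape m r c) {p q : Int × Int}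
    (hp : pvOk r c p) (hq : pvOk r c q) (hne : p ≠ q) (v w : Int) :
    pvSet2 (pvSet2 m p.1 p.2 v) q.1 q.2 w = pvSet2 (pvSet2 m q.1 q.2 w) p.1 p.2 v := by
  obtain ⟨hlen, hrow⟩ := h
  obtain ⟨h1, h2, h3, h4⟩ := hp
  obtain ⟨g1, g2, g3, g4⟩ := hq
  rw [← Int.toNat_of_nonneg h1, ← Int.toNat_of_nonneg h3,
      ← Int.toNat_of_nonneg g1, ← Int.toNat_of_nonneg g3,
      pvSet2_nat, pvSet2_nat, pvSet2_nat, pvSet2_nat]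
  have ha : p.1.toNat < m.length := by omega
  have hb : q.1.toNat < m.length := by omega
  by_cases hy : p.1.toNat = q.1.toNat
  · have hx : p.2.toNat ≠ q.2.toNat := by
      intro hx; apply hne; ext
      · omega
      · omega
    rw [← hy]
    have e1 : ((m.set p.1.toNat ((m.getD p.1.toNat []).set p.2.toNat v)).getD p.1.toNat [])
        = (m.getD p.1.toNat []).set p.2.toNat v := by simp [List.getD_eq_getElem?_getD, ha]
    have e2 : ((m.set p.1.toNat ((m.getD p.1.toNat []).set q.2.toNat w)).getD p.1.toNat [])
        = (m.getD p.1.toNat []).set q.2.toNat w := by simp [List.getD_eq_getElem?_getD, ha]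
    rw [e1, e2, List.set_set, List.set_set, List.set_comm _ _ hx]
  · have e1 : ((m.set p.1.toNat ((m.getD p.1.toNat []).set p.2.toNat v)).getD q.1.toNat [])
        = m.getD q.1.toNat [] := by simp [List.getD_eq_getElem?_getD, List.getElem?_set_ne, hy]
    have e2 : ((m.set q.1.toNat ((m.getD q.1.toNat []).set q.2.toNat w)).getD p.1.toNat [])
        = m.getD p.1.toNat [] := by
      simp [List.getD_eq_getElem?_getD, List.getElem?_set_ne, (Ne.symm hy)]
    rw [e1, e2, List.set_comm _ _ hy]

def pvScatter (m : List (List Int)) (l : List ((Int × Int) × Int)) : List (List Int) :=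
  l.foldl (fun g pv => pvSet2 g pv.1.1 pv.1.2 pv.2) m

lemma pvScatter_cons (m : List (List Int)) (p : Int × Int) (v : Int) (l : List ((Int × Int) × Int)) :
    pvScatter m ((p, v) :: l) = pvScatter (pvSet2 m p.1 p.2 v) l := rfl

lemma pvShape_scatter {r c : Nat} (l : List ((Int × Int) × Int)) {m : List (List Int)}
    (h : pvShape m r c) (hl : ∀ pv ∈ l, pvOk r c pv.1) : pvShape (pvScatter m l) r c := by
  induction l generalizing m with
  | nil => exact h
  | cons pv t ih =>
    exact ih (pvShape_set2 h (hl pv (List.mem_cons_self ..)) _)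
      (fun x hx => hl x (List.mem_cons_of_mem _ hx))

lemma pvGet2_scatter_notmem {r c : Nat} {l : List ((Int × Int) × Int)} {m : List (List Int)}
    (h : pvShape m r c) (hl : ∀ pv ∈ l, pvOk r c pv.1) {q : Int × Int} (hq : pvOk r c q)
    (hne : ∀ pv ∈ l, pv.1 ≠ q) : pvGet2 (pvScatter m l) q.1 q.2 = pvGet2 m q.1 q.2 := by
  induction l generalizing m with
  | nil => rfl
  | cons pv t ih =>
    rw [show pv = (pv.1, pv.2) from rfl, pvScatter_cons]
    rw [ih (pvShape_set2 h (hl pv (List.mem_cons_self ..)) _)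
        (fun x hx => hl x (List.mem_cons_of_mem _ hx))
        (fun x hx => hne x (List.mem_cons_of_mem _ hx))]
    exact pvGet2_set2_ne h (hl pv (List.mem_cons_self ..)) hq (hne pv (List.mem_cons_self ..)) _

lemma pvSet2_scatter_comm {r c : Nat} {l : List ((Int × Int) × Int)} {m : List (List Int)}
    (h : pvShape m r c) (hl : ∀ pv ∈ l, pvOk r c pv.1) {q : Int × Int} (hq : pvOk r c q)
    (hne : ∀ pv ∈ l, pv.1 ≠ q) (w : Int) :
    pvSet2 (pvScatter m l) q.1 q.2 w = pvScatter (pvSet2 m q.1 q.2 w) l := by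
  induction l generalizing m with
  | nil => rfl
  | cons pv t ih =>
    rw [show pv = (pv.1, pv.2) from rfl, pvScatter_cons, pvScatter_cons]
    rw [ih (pvShape_set2 h (hl pv (List.mem_cons_self ..)) _)
        (fun x hx => hl x (List.mem_cons_of_mem _ hx))
        (fun x hx => hne x (List.mem_cons_of_mem _ hx))]
    rw [pvSet2_comm h (hl pv (List.mem_cons_self ..)) hq (hne pv (List.mem_cons_self ..))]


lemma pvSlideA {r c : Nat} (cs : List (Int × Int)) :
    ∀ (m : List (List Int)) (preq mv : Int), pvShape m r c → cs.Nodup →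
      (∀ p ∈ cs, pvOk r c p) →
      cs.foldl pvStepA (m, preq, mv) =
        (pvScatter m (cs.zip (preq :: (cs.map (fun p => pvGet2 m p.1 p.2)).dropLast)),
         (cs.map (fun p => pvGet2 m p.1 p.2)).getLastD preq,
         (cs.map (fun p => pvGet2 m p.1 p.2)).foldl (fun a v => min v a) mv) := by
  induction cs with
  | nil => intro m preq mv _ _ _; rfl
  | cons p t ih =>
    intro m preq mv hS hnd hok
    have hokp := hok p (List.mem_cons_self ..)
    have hokt : ∀ x ∈ t, pvOk r c x := fun x hx => hok x (List.mem_cons_of_mem _ hx)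
    have hpt : p ∉ t := (List.nodup_cons.mp hnd).1
    have hS' : pvShape (pvSet2 m p.1 p.2 preq) r c := pvShape_set2 hS hokp _
    have hmap : t.map (fun q => pvGet2 (pvSet2 m p.1 p.2 preq) q.1 q.2)
        = t.map (fun q => pvGet2 m q.1 q.2) := by
      apply List.map_congr_left
      intro q hq
      exact pvGet2_set2_ne hS hokp (hokt q hq) (by rintro rfl; exact hpt hq) _
    have hstep : List.foldl pvStepA (m, preq, mv) (p :: t)
        = List.foldl pvStepA (pvSet2 m p.1 p.2 preq, pvGet2 m p.1 p.2,
            min (pvGet2 m p.1 p.2) mv) t := rfl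
    rw [hstep, ih _ _ _ hS' (List.nodup_cons.mp hnd).2 hokt, hmap]
    refine Prod.ext ?_ (Prod.ext ?_ ?_)
    · show pvScatter (pvSet2 m p.1 p.2 preq) _ = pvScatter m _
      rw [List.map_cons]
      cases t with
      | nil => rfl
      | cons q t' =>
        simp only [List.map_cons, List.dropLast_cons₂, List.zip_cons_cons, pvScatter_cons]
    · simp only [List.map_cons, List.getLastD_cons]
    · simp only [List.map_cons, List.foldl_cons]

def pvBnd (m : List (List Int)) (b : Int) : Prop :=
  ∀ row ∈ m, ∀ v ∈ row, v < b

lemma pvGet2_lt {m : List (List Int)} {r c : Nat} {b : Int} (hS : pvShape m r c)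
    (hB : pvBnd m b) {p : Int × Int} (hp : pvOk r c p) : pvGet2 m p.1 p.2 < b := by
  obtain ⟨hlen, hrow⟩ := hS
  obtain ⟨h1, h2, h3, h4⟩ := hp
  rw [← Int.toNat_of_nonneg h1, ← Int.toNat_of_nonneg h3, pvGet2_nat]
  have ha : p.1.toNat < m.length := by omega
  have hrm : m.getD p.1.toNat [] ∈ m := pvGetDrow_mem _ ha
  have hb : p.2.toNat < (m.getD p.1.toNat []).length := by
    rw [hrow _ hrm]; omega
  apply hB _ hrm
  rw [List.getD_eq_getElem _ _ hb]
  exact List.getElem_mem hb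

lemma pvBnd_set2 {m : List (List Int)} {r c : Nat} {b : Int} (hS : pvShape m r c)
    (hB : pvBnd m b) {p : Int × Int} (hp : pvOk r c p) {v : Int} (hv : v < b) :
    pvBnd (pvSet2 m p.1 p.2 v) b := by
  obtain ⟨hlen, hrow⟩ := hS
  obtain ⟨h1, h2, h3, h4⟩ := hp
  rw [← Int.toNat_of_nonneg h1, ← Int.toNat_of_nonneg h3, pvSet2_nat]
  intro row hmem w hw
  rcases List.mem_or_eq_of_mem_set hmem with hr | hr
  · exact hB row hr w hw
  · subst hr
    rcases List.mem_or_eq_of_mem_set hw with hv' | hv'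
    · exact hB _ (pvGetDrow_mem _ (by omega)) w hv'
    · subst hv'; exact hv

lemma pvBnd_scatter {r c : Nat} {l : List ((Int × Int) × Int)} {b : Int} :
    ∀ {m : List (List Int)}, pvShape m r c → pvBnd m b → (∀ pv ∈ l, pvOk r c pv.1) →
      (∀ pv ∈ l, pv.2 < b) → pvBnd (pvScatter m l) b := by
  induction l with
  | nil => intro m _ hB _ _; exact hB
  | cons pv t ih =>
    intro m hS hB hok hv
    rw [show pv = (pv.1, pv.2) from rfl, pvScatter_cons]
    exact ih (pvShape_set2 hS (hok pv (List.mem_cons_self ..)) _)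
      (pvBnd_set2 hS hB (hok pv (List.mem_cons_self ..)) (hv pv (List.mem_cons_self ..)))
      (fun x hx => hok x (List.mem_cons_of_mem _ hx))
      (fun x hx => hv x (List.mem_cons_of_mem _ hx))

lemma pvInit_shape (rows columns : Int) :
    pvShape ((PySem.List.pyRange 0 rows 1).map
      (fun r => (PySem.List.pyRange 0 columns 1).map (fun c => r * columns + c + 1)))
      rows.toNat columns.toNat := by
  constructor
  · simp [PySem.List.length_pyRange_one]
  · intro row hmem
    simp only [List.mem_map] at hmem
    obtain ⟨r, _, hr⟩ := hmem
    rw [← hr]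
    simp [PySem.List.length_pyRange_one]

lemma pvInit_bnd (rows columns : Int) :
    pvBnd ((PySem.List.pyRange 0 rows 1).map
      (fun r => (PySem.List.pyRange 0 columns 1).map (fun c => r * columns + c + 1)))
      (rows * columns + 1) := by
  intro row hmem v hv
  simp only [List.mem_map] at hmem
  obtain ⟨r, hrmem, hr⟩ := hmem
  rw [← hr] at hv
  simp only [List.mem_map] at hv
  obtain ⟨cc, hcmem, hc⟩ := hv
  rw [PySem.List.mem_pyRange_one] at hrmem hcmem
  have hcol : 0 < columns := by omega
  have : r * columns ≤ (rows - 1) * columns :=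
    mul_le_mul_of_nonneg_right (by omega) (by omega)
  nlinarith [this]


lemma pvRange_neg_split (y1 y2 : Int) (h : y1 ≤ y2) :
    PySem.List.pyRange y2 (y1 - 1) (-1) = PySem.List.pyRange y2 y1 (-1) ++ [y1] := by
  rw [PySem.List.pyRange_neg_one_eq_reverse, PySem.List.pyRange_neg_one_eq_reverse]
  rw [show y1 - 1 + 1 = y1 by ring]
  rw [PySem.List.pyRange_one_cons (by omega : y1 < y2 + 1)]
  simp



def pvCoords (y1 x1 y2 x2 : Int) : List (Int × Int) :=
  (PySem.List.pyRange x1 x2 1).map (fun x => (y1, x))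
  ++ (PySem.List.pyRange y1 y2 1).map (fun y => (y, x2))
  ++ (PySem.List.pyRange x2 x1 (-1)).map (fun x => (y2, x))
  ++ (PySem.List.pyRange y2 y1 (-1)).map (fun y => (y, x1))

lemma pvCoords_ok {rows columns y1 x1 y2 x2 : Int} (h1 : 0 ≤ y1) (h2 : y1 < y2)
    (h3 : y2 < rows) (h4 : 0 ≤ x1) (h5 : x1 < x2) (h6 : x2 < columns) :
    ∀ p ∈ pvCoords y1 x1 y2 x2, pvOk rows.toNat columns.toNat p := by
  intro p hp
  simp only [pvCoords, List.mem_append, List.mem_map] at hp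
  rcases hp with ((⟨x, hx, rfl⟩ | ⟨y, hy, rfl⟩) | ⟨x, hx, rfl⟩) | ⟨y, hy, rfl⟩ <;>
    first
      | (rw [PySem.List.mem_pyRange_one] at *; exact ⟨by omega, by omega, by omega, by omega⟩)
      | (rw [PySem.List.mem_pyRange_neg_one] at *; exact ⟨by omega, by omega, by omega, by omega⟩)

lemma pvCoords_nodup {y1 x1 y2 x2 : Int} (h2 : y1 < y2) (h5 : x1 < x2) :
    (pvCoords y1 x1 y2 x2).Nodup := by
  have inj1 : ∀ z : Int, Function.Injective (fun x : Int => (z, x)) := by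
    intro z u v huv; simpa using huv
  have inj2 : ∀ z : Int, Function.Injective (fun y : Int => (y, z)) := by
    intro z u v huv; simpa using huv
  have ndneg : ∀ a b : Int, (PySem.List.pyRange a b (-1)).Nodup := by
    intro a b
    rw [PySem.List.pyRange_neg_one_eq_reverse, List.nodup_reverse]
    exact PySem.List.nodup_pyRange_one _ _
  have mem1 : ∀ p ∈ (PySem.List.pyRange x1 x2 1).map (fun x => (y1, x)),
      p.1 = y1 ∧ x1 ≤ p.2 ∧ p.2 < x2 := by
    intro p hp; simp only [List.mem_map] at hp
    obtain ⟨x, hx, rfl⟩ := hp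
    rw [PySem.List.mem_pyRange_one] at hx
    exact ⟨rfl, hx.1, hx.2⟩
  have mem2 : ∀ p ∈ (PySem.List.pyRange y1 y2 1).map (fun y => (y, x2)),
      p.2 = x2 ∧ y1 ≤ p.1 ∧ p.1 < y2 := by
    intro p hp; simp only [List.mem_map] at hp
    obtain ⟨y, hy, rfl⟩ := hp
    rw [PySem.List.mem_pyRange_one] at hy
    exact ⟨rfl, hy.1, hy.2⟩
  have mem3 : ∀ p ∈ (PySem.List.pyRange x2 x1 (-1)).map (fun x => (y2, x)),
      p.1 = y2 ∧ x1 < p.2 ∧ p.2 ≤ x2 := by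
    intro p hp; simp only [List.mem_map] at hp
    obtain ⟨x, hx, rfl⟩ := hp
    rw [PySem.List.mem_pyRange_neg_one] at hx
    exact ⟨rfl, hx.1, hx.2⟩
  have mem4 : ∀ p ∈ (PySem.List.pyRange y2 y1 (-1)).map (fun y => (y, x1)),
      p.2 = x1 ∧ y1 < p.1 ∧ p.1 ≤ y2 := by
    intro p hp; simp only [List.mem_map] at hp
    obtain ⟨y, hy, rfl⟩ := hp
    rw [PySem.List.mem_pyRange_neg_one] at hy
    exact ⟨rfl, hy.1, hy.2⟩
  unfold pvCoords
  rw [List.append_assoc, List.append_assoc, List.nodup_append]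
  refine ⟨(PySem.List.nodup_pyRange_one _ _).map (inj1 _), ?_, ?_⟩
  · rw [List.nodup_append]
    refine ⟨(PySem.List.nodup_pyRange_one _ _).map (inj2 _), ?_, ?_⟩
    · rw [List.nodup_append]
      refine ⟨(ndneg _ _).map (inj1 _), (ndneg _ _).map (inj2 _), ?_⟩
      · intro p hp q hq hne
        subst hne
        have f3 := mem3 p hp
        have f4 := mem4 p hq
        omega
    · intro p hp q hq hne
      subst hne
      have f2 := mem2 p hp
      rcases List.mem_append.mp hq with h | h
      · have f3 := mem3 p h; omega
      · have f4 := mem4 p h; omega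
  · intro p hp q hq hne
    subst hne
    have f1 := mem1 p hp
    rcases List.mem_append.mp hq with h | h
    · have f2 := mem2 p h; omega
    · rcases List.mem_append.mp h with h' | h'
      · have f3 := mem3 p h'; omega
      · have f4 := mem4 p h'; omega

lemma pvQStep_eq (rows columns : Int) (st : List (List Int) × List Int) (loc : List Int)
    (hq : pvQueryOK rows columns loc = true)
    (hS : pvShape st.1 rows.toNat columns.toNat)
    (hB : pvBnd st.1 (rows * columns + 1)) :
    pvQStepA rows columns st loc = pvQStepB st loc
      ∧ pvShape (pvQStepB st loc).1 rows.toNat columns.toNat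
      ∧ pvBnd (pvQStepB st loc).1 (rows * columns + 1) := by
  match loc with
  | [] | [_] | [_, _] | [_, _, _] | _ :: _ :: _ :: _ :: _ :: _ => simp [pvQueryOK] at hq
  | [a, b, cc, d] =>
  simp only [pvQueryOK, decide_eq_true_eq] at hq
  obtain ⟨ha1, hacc, hccr, hb1, hbd, hdc⟩ := hq
  set y1 : Int := a - 1 with hy1def
  set x1 : Int := b - 1 with hx1def
  set y2 : Int := cc - 1 with hy2def
  set x2 : Int := d - 1 with hx2def
  have hrows0 : 0 < rows := by omega
  have hcols0 : 0 < columns := by omega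
  have hy2r : y2 < (rows.toNat : Int) := by omega
  have hx2c : x2 < (columns.toNat : Int) := by omega
  set C := pvCoords y1 x1 y2 x2 with hCdef
  have hok : ∀ p ∈ C, pvOk rows.toNat columns.toNat p :=
    pvCoords_ok (by omega) (by omega) (by omega) (by omega) (by omega) (by omega)
  have hnd : C.Nodup := pvCoords_nodup (by omega) (by omega)
  have hc0ok : pvOk rows.toNat columns.toNat (y1, x1) := ⟨by omega, by omega, by omega, by omega⟩
  -- A's four loops are one fold over C ++ [(y1, x1)]
  have eA : pvQStepA rows columns st [a, b, cc, d] =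
      (((C ++ [(y1, x1)]).foldl pvStepA (st.1, pvGet2 st.1 y1 x1, rows * columns + 1)).1,
       st.2 ++ [((C ++ [(y1, x1)]).foldl pvStepA
         (st.1, pvGet2 st.1 y1 x1, rows * columns + 1)).2.2]) := by
    have g0 : PySem.List.pyGetD ([a, b, cc, d].map (fun x => x - 1)) 0 0 = y1 := rfl
    have g1 : PySem.List.pyGetD ([a, b, cc, d].map (fun x => x - 1)) 1 0 = x1 := rfl
    have g2 : PySem.List.pyGetD ([a, b, cc, d].map (fun x => x - 1)) 2 0 = y2 := rfl
    have g3 : PySem.List.pyGetD ([a, b, cc, d].map (fun x => x - 1)) 3 0 = x2 := rfl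
    simp only [pvQStepA, g0, g1, g2, g3, hCdef, pvCoords]
    rw [pvRange_neg_split y1 y2 (by omega)]
    simp only [List.foldl_append, List.foldl_map, List.foldl_cons, List.foldl_nil]
  -- B side normalization
  have b0 : PySem.List.pyGetD [a, b, cc, d] 0 0 - 1 = y1 := by rw [hy1def]; rfl
  have b1 : PySem.List.pyGetD [a, b, cc, d] 1 0 - 1 = x1 := by rw [hx1def]; rfl
  have b2 : PySem.List.pyGetD [a, b, cc, d] 2 0 - 1 = y2 := by rw [hy2def]; rfl
  have b3 : PySem.List.pyGetD [a, b, cc, d] 3 0 - 1 = x2 := by rw [hx2def]; rfl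
  have eB : pvQStepB st [a, b, cc, d] =
      (pvScatter st.1 (C.zip
          (PySem.List.pyGetD (C.map (fun p => pvGet2 st.1 p.1 p.2)) (-1) 0
            :: PySem.List.slice (C.map (fun p => pvGet2 st.1 p.1 p.2)) none (some (-1)))),
       st.2 ++ [(PySem.List.min? (C.map (fun p => pvGet2 st.1 p.1 p.2)) (fun v => v)).getD 0]) := by
    simp only [pvQStepB, b0, b1, b2, b3, hCdef, pvCoords, pvScatter]
  -- decompose C and the gathered values
  obtain ⟨Ct, hCt⟩ : ∃ t, C = (y1, x1) :: t := by
    rw [hCdef]; unfold pvCoords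
    rw [PySem.List.pyRange_one_cons (show x1 < x2 by omega)]
    exact ⟨_, rfl⟩
  set v0 : Int := pvGet2 st.1 y1 x1 with hv0def
  set valst : List Int := Ct.map (fun p => pvGet2 st.1 p.1 p.2) with hvalst
  have hvals : C.map (fun p => pvGet2 st.1 p.1 p.2) = v0 :: valst := by
    rw [hCt, List.map_cons]
  have hc0nin : (y1, x1) ∉ Ct := by
    have := hnd
    rw [hCt, List.nodup_cons] at this
    exact this.1
  set rest : List ((Int × Int) × Int) := Ct.zip ((v0 :: valst).dropLast) with hrest
  have hrestok : ∀ pv ∈ rest, pvOk rows.toNat columns.toNat pv.1 := by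
    intro pv hpv
    apply hok
    rw [hCt]
    exact List.mem_cons_of_mem _ (List.of_mem_zip (by rw [show pv = (pv.1, pv.2) from rfl] at hpv; exact hpv)).1
  have hrestne : ∀ pv ∈ rest, pv.1 ≠ (y1, x1) := by
    intro pv hpv he
    apply hc0nin
    rw [← he]
    exact (List.of_mem_zip (by rw [show pv = (pv.1, pv.2) from rfl] at hpv; exact hpv)).1
  have hS1 : pvShape (pvSet2 st.1 y1 x1 v0) rows.toNat columns.toNat := pvShape_set2 hS hc0ok _
  have hzipA : C.zip (v0 :: (C.map (fun p => pvGet2 st.1 p.1 p.2)).dropLast)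
      = ((y1, x1), v0) :: rest := by
    rw [hCt]
    simp only [List.map_cons, List.zip_cons_cons]
    rfl
  -- the sliding pass over C in normal form
  have hslide := pvSlideA C st.1 v0 (rows * columns + 1) hS hnd hok
  rw [hzipA, hvals] at hslide
  set lastv : Int := (v0 :: valst).getLastD v0 with hlastv
  set mfin : Int := (v0 :: valst).foldl (fun a v => min v a) (rows * columns + 1) with hmfin
  have hM1S : pvShape (pvScatter (pvSet2 st.1 y1 x1 v0) rest) rows.toNat columns.toNat :=
    pvShape_scatter _ hS1 hrestok
  have htemp : pvGet2 (pvScatter (pvSet2 st.1 y1 x1 v0) rest) y1 x1 = v0 := by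
    have h1 := pvGet2_scatter_notmem (q := (y1, x1)) hS1 hrestok hc0ok hrestne
    have h2 := pvGet2_set2_self (p := (y1, x1)) hS hc0ok v0
    exact h1.trans h2
  -- A's closing step
  have hAfold : List.foldl pvStepA (st.1, pvGet2 st.1 y1 x1, rows * columns + 1) (C ++ [(y1, x1)])
      = (pvSet2 (pvScatter (pvSet2 st.1 y1 x1 v0) rest) y1 x1 lastv, v0, min v0 mfin) := by
    rw [List.foldl_append, ← hv0def, hslide, pvScatter_cons]
    simp only [List.foldl_cons, List.foldl_nil, pvStepA, htemp]
  -- the two grids agree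
  have hgridA : pvSet2 (pvScatter (pvSet2 st.1 y1 x1 v0) rest) y1 x1 lastv
      = pvScatter (pvSet2 st.1 y1 x1 lastv) rest := by
    have h1 := pvSet2_scatter_comm (q := (y1, x1)) hS1 hrestok hc0ok hrestne lastv
    have h2 := pvSet2_set2_self (p := (y1, x1)) hS hc0ok v0 lastv
    rw [h1, h2]
  have hlastB : PySem.List.pyGetD (v0 :: valst) (-1) 0 = lastv := by
    rw [PySem.List.pyGetD_neg_one _ _ (List.cons_ne_nil _ _), hlastv,
      List.getLastD_eq_getLast?, List.getLast?_eq_some_getLast (List.cons_ne_nil _ _)]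
    rfl
  have hzipB : C.zip (lastv :: (v0 :: valst).dropLast) = ((y1, x1), lastv) :: rest := by
    rw [hCt, List.zip_cons_cons]
  -- the two appended answers agree
  have hvbnd : ∀ w ∈ v0 :: valst, w < rows * columns + 1 := by
    intro w hw
    rw [← hvals] at hw
    obtain ⟨p, hp, rfl⟩ := List.mem_map.mp hw
    exact pvGet2_lt hS hB (hok p hp)
  have hminflip : mfin = valst.foldl min v0 := by
    rw [hmfin]
    have hc : (fun (a v : Int) => min v a) = fun a v => min a v := by
      funext a v; exact min_comm v a
    rw [hc, List.foldl_cons, min_eq_right (le_of_lt (hvbnd v0 (List.mem_cons_self ..)))]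
  have hans : min v0 mfin = (PySem.List.min? (v0 :: valst) (fun v => v)).getD 0 := by
    rw [PySem.List.min?_id_cons, Option.getD_some, hminflip]
    exact min_eq_right (PySem.List.foldl_min_le valst v0).1
  -- assemble the equality of the two step results
  refine ⟨?_, ?_, ?_⟩
  · rw [eA, eB, hAfold, hvals, hlastB]
    rw [PySem.List.slice_to_neg_one, hzipB, pvScatter_cons]
    have : pvSet2 st.1 (y1, x1).1 (y1, x1).2 lastv = pvSet2 st.1 y1 x1 lastv := rfl
    rw [this, hgridA, hans]
  · rw [eB, hvals, hlastB, PySem.List.slice_to_neg_one, hzipB, pvScatter_cons]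
    exact pvShape_scatter _ (pvShape_set2 hS hc0ok _) hrestok
  · rw [eB, hvals, hlastB, PySem.List.slice_to_neg_one, hzipB, pvScatter_cons]
    apply pvBnd_scatter (pvShape_set2 hS hc0ok _)
      (pvBnd_set2 hS hB hc0ok (hvbnd lastv ?_)) hrestok ?_
    · rw [hlastv, List.getLastD_eq_getLast?, List.getLast?_eq_some_getLast (List.cons_ne_nil _ _),
        Option.getD_some]
      exact List.getLast_mem _
    · intro pv hpv
      apply hvbnd
      have hm := (List.of_mem_zip (by rw [show pv = (pv.1, pv.2) from rfl] at hpv; exact hpv)).2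
      exact List.mem_of_mem_dropLast hm

lemma pvFold_eq (rows columns : Int) (queries : List (List Int))
    (hpre : ∀ q ∈ queries, pvQueryOK rows columns q = true) :
    ∀ (m : List (List Int)) (acc : List Int),
      pvShape m rows.toNat columns.toNat → pvBnd m (rows * columns + 1) →
      queries.foldl (pvQStepA rows columns) (m, acc) = queries.foldl pvQStepB (m, acc) := by
  induction queries with
  | nil => intro m acc _ _; rfl
  | cons q t ih =>
    intro m acc hS hB
    have hq := hpre q (List.mem_cons_self ..)
    obtain ⟨heq, hS', hB'⟩ := pvQStep_eq rows columns (m, acc) q hq hS hB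
    simp only [List.foldl_cons, heq]
    have := ih (fun q hq => hpre q (List.mem_cons_of_mem _ hq)) (pvQStepB (m, acc) q).1
      (pvQStepB (m, acc) q).2 hS' hB'
    simpa using this

-- ===== VERDICT (by name: the statement is the Claim_ definition above) =====
theorem solution_spec : Claim_equal_solution := by
  intro rows columns queries _hdom hpre
  unfold Spec_solution solution solution_alt
  exact congrArg Prod.snd
    (pvFold_eq rows columns queries hpre _ [] (pvInit_shape rows columns) (pvInit_bnd rows columns))
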